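-- pv_equiv track=rewrite | github.com/yuzhoumo/advent-of-code | 2024/day05.py | is_valid
-- ===== SOURCE A (Python) =====
-- def is_valid(rules, stack):
--     seen = set()
--     for n in stack:
--         for after in rules[n]:
--             if after in seen:
--                 return False
--         seen.add(n)
--     return True
-- ===== SOURCE B (Python) =====
-- def is_valid(rules, stack):
--     for j in range(len(stack)):
--         r = rules[stack[j]]
--         for i in range(j):
--             if stack[i] in r:
--                 return False
--     return True
-- ===== Notes on version B (the rewrite author's own statement) =====
-- stated objective: alternative
-- what changed: Replaces A's incrementally maintained 'seen' set (membership of rule-successors in the set of earlier pages) by an index-based nested scan that, for each position j, looks up rules[stack[j]] and directly checks whether any earlier element stack[i] (i<j) occurs in that rule list.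
import Mathlib
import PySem

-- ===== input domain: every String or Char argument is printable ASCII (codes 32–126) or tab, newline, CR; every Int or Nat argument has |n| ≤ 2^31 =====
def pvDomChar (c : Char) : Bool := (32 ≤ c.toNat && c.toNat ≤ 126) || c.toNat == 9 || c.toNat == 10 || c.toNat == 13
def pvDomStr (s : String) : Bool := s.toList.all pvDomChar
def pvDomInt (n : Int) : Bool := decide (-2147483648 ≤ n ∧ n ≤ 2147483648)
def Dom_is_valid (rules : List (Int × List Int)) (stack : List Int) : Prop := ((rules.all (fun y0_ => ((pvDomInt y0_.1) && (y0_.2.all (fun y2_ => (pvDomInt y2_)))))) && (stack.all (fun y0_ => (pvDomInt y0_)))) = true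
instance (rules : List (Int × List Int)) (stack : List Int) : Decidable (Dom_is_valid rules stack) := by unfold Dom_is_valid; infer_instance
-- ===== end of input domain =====

-- B replaces A's maintained 'seen' set by an index-based pairwise scan; same return value and same raising inputs.

-- ===== PORT A =====
def isValidA_go (rules : List (Int × List Int)) : List Int → PySem.Set Int → Bool
  | [], _ => true
  | n :: rest, seen =>
    -- rules[n]: KeyError (excluded by Pre_) when n is not a key
    let r := (PySem.Dict.mk rules).getD n []
    if r.any (fun after => PySem.Set.contains seen after) then false
    else isValidA_go rules rest (PySem.Set.add seen n)

def is_valid (rules : List (Int × List Int)) (stack : List Int) : Bool :=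
  isValidA_go rules stack PySem.Set.empty

-- ===== PORT B =====
def isValidB_go (rules : List (Int × List Int)) (stack : List Int) : List Int → Bool
  | [] => true
  | j :: js =>
    -- rules[stack[j]]: KeyError (excluded by Pre_) when stack[j] is not a key
    let r := (PySem.Dict.mk rules).getD (PySem.List.pyGetD stack j 0) []
    if (PySem.List.pyRange 0 j 1).any (fun i => r.contains (PySem.List.pyGetD stack i 0)) then false
    else isValidB_go rules stack js

def is_valid_alt (rules : List (Int × List Int)) (stack : List Int) : Bool :=
  isValidB_go rules stack (PySem.List.pyRange 0 (PySem.List.len stack) 1)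

-- ===== PRECONDITION & SPEC =====
-- Pre_ holds exactly where the Python A returns: either every page of the stack is a key of
-- rules, or an ordering violation occurs at some position all of whose pages up to it are keys
-- (A returns False there); on the remaining inputs A (and B alike) raises KeyError.
def Pre_is_valid (rules : List (Int × List Int)) (stack : List Int) : Prop :=
  (∀ n ∈ stack, (PySem.Dict.mk rules).contains n = true) ∨
  (∃ j < stack.length, (∀ k ≤ j, (PySem.Dict.mk rules).contains (stack.getD k 0) = true) ∧
     ∃ i < j, ((PySem.Dict.mk rules).getD (stack.getD j 0) []).contains (stack.getD i 0) = true)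
instance (rules : List (Int × List Int)) (stack : List Int) : Decidable (Pre_is_valid rules stack) := by unfold Pre_is_valid; infer_instance

def pvWitness_is_valid : (List (Int × List Int)) × List Int := ([(1, [2]), (2, [])], [1, 2])

def Spec_is_valid (rules : List (Int × List Int)) (stack : List Int) (out : Bool) : Prop := out = is_valid_alt rules stack
instance (rules : List (Int × List Int)) (stack : List Int) (out : Bool) : Decidable (Spec_is_valid rules stack out) := by unfold Spec_is_valid; infer_instance

-- ===== CLAIM (what is proved, stated in full; the proofs are below) =====
def Claim_equal_is_valid : Prop := ∀ (rules : List (Int × List Int)) (stack : List Int), Dom_is_valid rules stack → Pre_is_valid rules stack → Spec_is_valid rules stack (is_valid rules stack)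

-- ===== LEMMAS AND PROOFS =====

-- the violation test at position j: A's scan of rules[stack[j]] against 'seen' equals
-- B's scan of the earlier stack elements against rules[stack[j]]
lemma cond_eq (r pre rest : List Int) :
    r.any (fun after => PySem.Set.contains (PySem.Set.ofList pre) after)
    = (PySem.List.pyRange 0 (pre.length : Int) 1).any
        (fun i => r.contains (PySem.List.pyGetD (pre ++ rest) i 0)) := by
  rw [Bool.eq_iff_iff]
  simp only [List.any_eq_true, PySem.Set.contains_eq_listContains, List.contains_iff_mem,
    PySem.Set.mem_ofList, PySem.List.mem_pyRange_one]
  constructor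
  · rintro ⟨a, har, hap⟩
    obtain ⟨k, hk, hka⟩ := List.mem_iff_getElem.mp hap
    refine ⟨(k : Int), ⟨by omega, by exact_mod_cast hk⟩, ?_⟩
    have : PySem.List.pyGetD (pre ++ rest) (k : Int) 0 = a := by
      rw [PySem.List.pyGetD_natCast]
      rw [List.getD_eq_getElem?_getD, List.getElem?_append_left (by omega)]
      simp [hk, hka]
    rw [this]; exact har
  · rintro ⟨i, ⟨hi0, hilt⟩, hmem⟩
    refine ⟨PySem.List.pyGetD (pre ++ rest) i 0, hmem, ?_⟩
    have hlt : i.toNat < pre.length := by omega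
    have hcast : i = ((i.toNat : Nat) : Int) := by omega
    have h1 : PySem.List.pyGetD (pre ++ rest) i 0 = (pre ++ rest).getD i.toNat 0 := by
      rw [hcast, PySem.List.pyGetD_natCast]
      have hmax : (max i 0).toNat = i.toNat := by omega
      simp [hmax]
    have h2 : (pre ++ rest).getD i.toNat 0 = pre[i.toNat] := by
      rw [List.getD_eq_getElem?_getD, List.getElem?_append_left hlt]
      simp [hlt]
    rw [h1, h2]
    exact List.getElem_mem hlt

lemma go_eq (rules : List (Int × List Int)) (stack : List Int) :
    ∀ (rest pre : List Int), stack = pre ++ rest →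
    isValidA_go rules rest (PySem.Set.ofList pre)
      = isValidB_go rules stack (PySem.List.pyRange (pre.length : Int) (stack.length : Int) 1) := by
  intro rest
  induction rest with
  | nil =>
    intro pre h
    have : (pre.length : Int) = (stack.length : Int) := by simp [h]
    rw [this, PySem.List.pyRange_one_eq_nil (le_refl _)]
    rfl
  | cons n rest' ih =>
    intro pre h
    subst h
    have hlt : (pre.length : Int) < ((pre ++ n :: rest').length : Int) := by simp
    rw [PySem.List.pyRange_one_cons hlt]
    show (if ((PySem.Dict.mk rules).getD n []).any
            (fun after => PySem.Set.contains (PySem.Set.ofList pre) after) then false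
          else isValidA_go rules rest' (PySem.Set.add (PySem.Set.ofList pre) n)) = _
    have hget : PySem.List.pyGetD (pre ++ n :: rest') (pre.length : Int) 0 = n := by
      rw [PySem.List.pyGetD_natCast, List.getD_eq_getElem?_getD]
      simp
    show _ = (if (PySem.List.pyRange 0 (pre.length : Int) 1).any
            (fun i => ((PySem.Dict.mk rules).getD (PySem.List.pyGetD (pre ++ n :: rest') (pre.length : Int) 0) []).contains
              (PySem.List.pyGetD (pre ++ n :: rest') i 0)) then false
          else isValidB_go rules (pre ++ n :: rest')
            (PySem.List.pyRange ((pre.length : Int) + 1) (((pre ++ n :: rest').length : Int)) 1))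
    rw [hget, cond_eq ((PySem.Dict.mk rules).getD n []) pre (n :: rest')]
    split_ifs with hc
    · rfl
    · have hadd : PySem.Set.add (PySem.Set.ofList pre) n = PySem.Set.ofList (pre ++ [n]) := by
        simp [PySem.Set.ofList_eq_foldl, List.foldl_append]
      have hlen : ((pre ++ [n]).length : Int) = (pre.length : Int) + 1 := by simp
      rw [hadd, ← hlen]
      exact ih (pre ++ [n]) (by simp)

-- ===== VERDICT (by name: the statement is the Claim_ definition above) =====
theorem is_valid_spec : Claim_equal_is_valid := by
  intro rules stack _ _
  show is_valid rules stack = is_valid_alt rules stack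
  have h := go_eq rules stack stack [] rfl
  simpa [is_valid, is_valid_alt, PySem.List.len, PySem.Set.ofList, PySem.Set.empty] using h
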